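-- pv_equiv track=rewrite | github.com/PrasadKumar2024/Reno | app/services/document_service.py | _find_optimal_breakpoint
-- ===== SOURCE A (Python) =====
-- def _find_optimal_breakpoint(text: str, start: int, end: int) -> int:
--     """
--     Find optimal break point for chunking at natural boundaries
--
--     Args:
--         text: Full text
--         start: Start position
--         end: End position
--
--     Returns:
--         Optimal break position
--     """
--     # Priority order of breakpoints
--     breakpoints = [
--         ('\n\n', 2),      # Paragraph break
--         ('. ', 2),        # Sentence end with space
--         ('.\n', 2),       # Sentence end with newline
--         ('? ', 2),        # Question end
--         ('! ', 2),        # Exclamation end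
--         ('\n', 1),        # Line break
--         ('.', 1),         # Sentence end without space
--         ('?', 1),         # Question end
--         ('!', 1),         # Exclamation end
--         (',', 1),         # Comma
--         (';', 1),         # Semicolon
--         (' ', 1),         # Space
--     ]
--
--     # Search from end backwards
--     search_start = max(start, end - 100)  # Look in last 100 chars
--
--     for delimiter, min_length in breakpoints:
--         break_pos = text.rfind(delimiter, search_start, end)
--         if break_pos > start and (break_pos + len(delimiter)) - start >= min_length:
--             return break_pos + len(delimiter)
--
--     return end  # No good break found, use original end
-- ===== SOURCE B (Python) =====
-- def _clamp0(k, n):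
--     """Normalize a slice lower bound: negative counts from the end, floored at 0."""
--     if k < 0:
--         k += n
--         if k < 0:
--             k = 0
--     return k
--
--
-- def _find_optimal_breakpoint(text: str, start: int, end: int) -> int:
--     """Single forward pass over the searched window records the rightmost position
--     where every 1-/2-char pattern begins; one scan of the priority list then picks
--     the first delimiter with a recorded position beyond start."""
--     breakpoints = [
--         '\n\n', '. ', '.\n', '? ', '! ',
--         '\n', '.', '?', '!', ',', ';', ' ',
--     ]
--     n = len(text)
--     lo = _clamp0(max(start, end - 100), n)
--     hi = min(_clamp0(end, n), n)
--     last = {}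
--     for p in range(lo, hi):
--         if p + 2 <= hi:
--             last[text[p:p + 2]] = p
--         last[text[p]] = p
--     for delim in breakpoints:
--         pos = last.get(delim)
--         if pos is not None and pos > start:
--             return pos + len(delim)
--     return end
-- ===== Notes on version B (the rewrite author's own statement) =====
-- stated objective: alternative
-- what changed: Instead of twelve separate backward rfind scans of the window, B makes one forward pass over the window recording in a dict the rightmost start position of every 1- and 2-char pattern, then picks the first qualifying delimiter from the priority list.
-- intended difference: When start <= -2 and the window contains no '\n\n', rfind's not-found sentinel -1 satisfies A's test '-1 > start' so A returns the meaningless position 1; B returns the highest-priority genuine breakpoint position (or end), which is the intended value. — e.g. on _find_optimal_breakpoint("abc", -2, 3): A returns 1, B returns 3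
import Mathlib
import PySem

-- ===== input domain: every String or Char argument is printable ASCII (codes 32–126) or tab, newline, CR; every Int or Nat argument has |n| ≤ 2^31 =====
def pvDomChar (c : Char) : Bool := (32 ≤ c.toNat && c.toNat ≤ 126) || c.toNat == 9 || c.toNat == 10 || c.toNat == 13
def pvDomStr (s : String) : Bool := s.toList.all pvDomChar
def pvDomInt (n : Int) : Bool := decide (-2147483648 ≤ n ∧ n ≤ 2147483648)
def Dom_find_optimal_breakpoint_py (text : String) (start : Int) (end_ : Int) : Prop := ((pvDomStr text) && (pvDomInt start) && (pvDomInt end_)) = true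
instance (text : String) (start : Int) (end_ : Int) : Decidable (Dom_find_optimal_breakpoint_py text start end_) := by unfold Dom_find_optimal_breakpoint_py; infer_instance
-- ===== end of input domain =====

-- B replaces A's twelve backward rfind scans of the window by ONE forward pass that
-- records the rightmost start position of every 1-/2-char pattern in a dict, followed
-- by one scan of the priority list (objective: alternative decomposition, same cost).

-- ===== PORT A =====
-- the priority-ordered breakpoint list of A, literal
def pvBpsA : List (String × Int) :=
  [("\n\n", 2), (". ", 2), (".\n", 2), ("? ", 2), ("! ", 2),
   ("\n", 1), (".", 1), ("?", 1), ("!", 1), (",", 1), (";", 1), (" ", 1)]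

-- A's `for delimiter, min_length in breakpoints` loop with early return
def pvGoA (text : String) (start end_ search_start : Int) : List (String × Int) → Int
  | [] => end_
  | (delim, min_length) :: rest =>
    let break_pos := PySem.Str.rfindFrom text delim search_start (some end_)
    if break_pos > start ∧ break_pos + PySem.Str.len delim - start ≥ min_length then
      break_pos + PySem.Str.len delim
    else pvGoA text start end_ search_start rest

def find_optimal_breakpoint_py (text : String) (start : Int) (end_ : Int) : Int :=
  pvGoA text start end_ (max start (end_ - 100)) pvBpsA

-- ===== PORT B =====
-- B's _clamp0: normalize a slice lower bound (negative counts from the end, floored at 0)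
def pvClamp0 (k : Int) (n : Nat) : Nat := (if k < 0 then k + n else k).toNat

-- B's priority list (delimiters as their character lists)
def pvBpsB : List (List Char) :=
  [['\n', '\n'], ['.', ' '], ['.', '\n'], ['?', ' '], ['!', ' '],
   ['\n'], ['.'], ['?'], ['!'], [','], [';'], [' ']]

-- B's single forward pass: dict holding the rightmost start position of each pattern
def pvDictB (t : List Char) (lo hi : Nat) : PySem.Dict (List Char) Int :=
  (List.range' lo (hi - lo)).foldl
    (fun d p =>
      let d := if p + 2 ≤ hi then d.insert ((t.drop p).take 2) (p : Int) else d
      d.insert ((t.drop p).take 1) (p : Int))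
    PySem.Dict.empty

-- B's scan of the priority list
def pvGoB (start end_ : Int) (dd : PySem.Dict (List Char) Int) : List (List Char) → Int
  | [] => end_
  | delim :: rest =>
    match dd.get? delim with
    | some pos => if pos > start then pos + delim.length else pvGoB start end_ dd rest
    | none => pvGoB start end_ dd rest

def find_optimal_breakpoint_py_alt (text : String) (start : Int) (end_ : Int) : Int :=
  pvGoB start end_
    (pvDictB text.toList
      (pvClamp0 (max start (end_ - 100)) text.toList.length)
      (min (pvClamp0 end_ text.toList.length) text.toList.length))
    pvBpsB

-- ===== PRECONDITION & SPEC =====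
-- When start ≤ -2 and the searched window contains no "\n\n", rfind's not-found
-- sentinel -1 passes A's test `-1 > start`, so A returns the meaningless position 1;
-- B returns the highest-priority genuine breakpoint (or end_), the intended value.
def D_find_optimal_breakpoint_py (text : String) (start : Int) (end_ : Int) : Prop :=
  start ≤ -2 ∧
  PySem.Chars.isIn ['\n', '\n']
    (PySem.List.slice text.toList (some (max start (end_ - 100))) (some end_)) = false

instance (text : String) (start : Int) (end_ : Int) : Decidable (D_find_optimal_breakpoint_py text start end_) := by
  unfold D_find_optimal_breakpoint_py; infer_instance

def Spec_find_optimal_breakpoint_py (text : String) (start : Int) (end_ : Int) (out : Int) : Prop :=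
  ¬ D_find_optimal_breakpoint_py text start end_ → out = find_optimal_breakpoint_py_alt text start end_

instance (text : String) (start : Int) (end_ : Int) (out : Int) : Decidable (Spec_find_optimal_breakpoint_py text start end_ out) := by
  unfold Spec_find_optimal_breakpoint_py; infer_instance

def pvDiffWitness_find_optimal_breakpoint_py : String × Int × Int := ("abc", -2, 3)
def pvDiffWitnessOut_find_optimal_breakpoint_py : Int × Int := (1, 3)

-- ===== CLAIM (what is proved, stated in full; the proofs are below) =====
def Claim_unchanged_find_optimal_breakpoint_py : Prop := ∀ (text : String) (start : Int) (end_ : Int), Dom_find_optimal_breakpoint_py text start end_ → Spec_find_optimal_breakpoint_py text start end_ (find_optimal_breakpoint_py text start end_)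
def Claim_changed_find_optimal_breakpoint_py : Prop := Dom_find_optimal_breakpoint_py (pvDiffWitness_find_optimal_breakpoint_py.1) (pvDiffWitness_find_optimal_breakpoint_py.2.1) (pvDiffWitness_find_optimal_breakpoint_py.2.2) ∧ D_find_optimal_breakpoint_py (pvDiffWitness_find_optimal_breakpoint_py.1) (pvDiffWitness_find_optimal_breakpoint_py.2.1) (pvDiffWitness_find_optimal_breakpoint_py.2.2) ∧ find_optimal_breakpoint_py (pvDiffWitness_find_optimal_breakpoint_py.1) (pvDiffWitness_find_optimal_breakpoint_py.2.1) (pvDiffWitness_find_optimal_breakpoint_py.2.2) = pvDiffWitnessOut_find_optimal_breakpoint_py.1 ∧ find_optimal_breakpoint_py_alt (pvDiffWitness_find_optimal_breakpoint_py.1) (pvDiffWitness_find_optimal_breakpoint_py.2.1) (pvDiffWitness_find_optimal_breakpoint_py.2.2) = pvDiffWitnessOut_find_optimal_breakpoint_py.2 ∧ pvDiffWitnessOut_find_optimal_breakpoint_py.1 ≠ pvDiffWitnessOut_find_optimal_breakpoint_py.2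

-- ===== LEMMAS AND PROOFS =====

-- a Python slice [a:b] is a drop/take window with pvClamp0-normalized bounds
theorem pv_slice_window (t : List Char) (i j : Int) :
    PySem.List.slice t (some i) (some j)
      = List.drop (pvClamp0 i t.length) (List.take (min (pvClamp0 j t.length) t.length) t) := by
  unfold PySem.List.slice PySem.List.clampIdx
  simp only
  have hbj : (if j < 0 then if (t.length : Int) + j < 0 then 0 else ((t.length : Int) + j).toNat
      else min j.toNat t.length) = min (pvClamp0 j t.length) t.length := by
    unfold pvClamp0; split_ifs <;> omega
  have hai : (if i < 0 then if (t.length : Int) + i < 0 then 0 else ((t.length : Int) + i).toNat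
      else min i.toNat t.length) = min (pvClamp0 i t.length) t.length := by
    unfold pvClamp0; split_ifs <;> omega
  rw [hbj, hai, List.drop_take]
  by_cases hl : pvClamp0 i t.length ≤ t.length
  · rw [min_eq_left hl]
  · rw [min_eq_right (le_of_not_ge hl),
      List.drop_of_length_le (le_refl _), List.drop_of_length_le (by omega)]
    simp

-- proof-layer predicate: `sub` occurs at absolute position p and fits before hi
def pvFit (t : List Char) (hi : Nat) (sub : List Char) (p : Nat) : Bool :=
  decide (p + sub.length ≤ hi) && sub.isPrefixOf (t.drop p)

-- characterization of CPython's rfind scan (PySem.Chars.rfind.go): last matching index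
theorem pv_go_eq (s sub : List Char) (m : Nat) :
    PySem.Chars.rfind.go s sub m =
      (((List.range (m + 1)).filter (fun j => sub.isPrefixOf (s.drop j))).getLast?.elim
        (-1) (fun j => (j : Int))) := by
  induction m with
  | zero =>
    by_cases h : sub.isPrefixOf s <;>
      simp [PySem.Chars.rfind.go, List.range_succ, List.filter, h]
  | succ k ih =>
    rw [show (k:Nat)+1+1 = (k+1)+1 from rfl, List.range_succ, List.filter_append,
      List.getLast?_append]
    by_cases h : sub.isPrefixOf (s.drop (k+1)) <;>
      simp [PySem.Chars.rfind.go, h, ih]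

-- rfind with slice bounds: last position of the window that carries a fitting match
theorem pv_rfindFrom_eq (t sub : List Char) (i j : Int) (hsub : sub ≠ []) :
    PySem.Chars.rfindFrom t sub i (some j) =
      (((List.range' (pvClamp0 i t.length)
          (min (pvClamp0 j t.length) t.length - pvClamp0 i t.length)).filter
            (pvFit t (min (pvClamp0 j t.length) t.length) sub)).getLast?.elim
        (-1) (fun p => (p : Int))) := by
  simp only [PySem.Chars.rfindFrom]
  set n := t.length with hn
  set lo := pvClamp0 i n with hlo
  set hi := min (pvClamp0 j n) n with hhi
  have hst : (if i < 0 then if i + (n:Int) < 0 then 0 else i + n else i) = ((lo : Nat) : Int) := by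
    rw [hlo]; unfold pvClamp0; split_ifs <;> omega
  have he : (if (n:Int) < j then (n:Int) else if j < 0 then if j + n < 0 then 0 else j + n else j)
      = ((hi : Nat) : Int) := by
    rw [hhi]; unfold pvClamp0
    rcases Nat.le_total ((if j < 0 then j + (n:Int) else j).toNat) n with h | h <;>
      split_ifs <;> omega
  rw [hst, he]
  simp only [Int.toNat_natCast]
  by_cases hcase : hi < lo
  · rw [if_pos (by exact_mod_cast hcase), Nat.sub_eq_zero_of_le (le_of_lt hcase)]
    simp
  · rw [if_neg (by exact_mod_cast hcase)]
    rw [not_lt] at hcase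
    have hin : hi ≤ n := by rw [hhi]; exact min_le_right _ _
    have hw : (List.drop lo (List.take hi t)).length = hi - lo := by
      simp only [List.length_drop, List.length_take]
      omega
    have hrf : PySem.Chars.rfind (List.drop lo (List.take hi t)) sub
        = (((List.range (hi - lo + 1)).filter
            (fun jj => sub.isPrefixOf ((List.drop lo (List.take hi t)).drop jj))).getLast?.elim
          (-1) (fun jj => (jj : Int))) := by
      rw [show PySem.Chars.rfind (List.drop lo (List.take hi t)) sub
          = PySem.Chars.rfind.go (List.drop lo (List.take hi t)) sub
              (List.drop lo (List.take hi t)).length from rfl, hw]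
      exact pv_go_eq _ _ _
    -- drop the top index hi-lo (no room for a nonempty sub there)
    have hlast : sub.isPrefixOf ((List.drop lo (List.take hi t)).drop (hi - lo)) = false := by
      rw [List.drop_of_length_le (by omega)]
      cases sub with
      | nil => exact absurd rfl hsub
      | cons a l => rfl
    rw [List.range_succ, List.filter_append, List.getLast?_append] at hrf
    simp only [List.filter_cons, hlast, Bool.false_eq_true, if_false, List.filter_nil,
      List.getLast?_nil, Option.none_or] at hrf
    -- align the two filters
    have hfilt : (List.range' lo (hi - lo)).filter (pvFit t hi sub)
        = ((List.range (hi - lo)).filter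
            (fun jj => sub.isPrefixOf ((List.drop lo (List.take hi t)).drop jj))).map
          (fun jj => lo + jj) := by
      rw [List.range'_eq_map_range, List.filter_map]
      congr 1
      apply List.filter_congr
      intro jj hjj
      rw [List.mem_range] at hjj
      simp only [Function.comp_apply, List.drop_drop, List.drop_take]
      unfold pvFit
      rcases hpre : sub.isPrefixOf (List.drop (lo + jj) t) with _ | _
      · have : sub.isPrefixOf (List.take (hi - lo - jj) (List.drop (lo + jj) t)) = false := by
          rcases h2 : sub.isPrefixOf (List.take (hi - lo - jj) (List.drop (lo + jj) t)) with _ | _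
          · rfl
          · rw [List.isPrefixOf_iff_prefix, List.prefix_take_iff] at h2
            have h3 := List.isPrefixOf_iff_prefix.mpr h2.1
            rw [hpre] at h3
            exact absurd h3 (by simp)
        simp [this]
      · rcases hfit : decide (lo + jj + sub.length ≤ hi) with _ | _
        · simp only [Bool.false_and]
          symm
          rcases h2 : sub.isPrefixOf (List.take (hi - lo - jj) (List.drop (lo + jj) t)) with _ | _
          · rfl
          · rw [List.isPrefixOf_iff_prefix, List.prefix_take_iff] at h2
            have := h2.2
            simp only [decide_eq_false_iff_not] at hfit
            omega
        · simp only [Bool.true_and]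
          symm
          rw [List.isPrefixOf_iff_prefix, List.prefix_take_iff]
          simp only [decide_eq_true_eq] at hfit
          exact_mod_cast (by
            constructor
            · exact List.isPrefixOf_iff_prefix.mp hpre
            · omega : sub <+: List.drop (lo + jj) t ∧ sub.length ≤ hi - lo - jj)
    rw [hrf, hfilt, List.getLast?_map]
    cases hgl : ((List.range (hi - lo)).filter
        (fun jj => sub.isPrefixOf ((List.drop lo (List.take hi t)).drop jj))).getLast? with
    | none => simp
    | some jj =>
      simp only [Option.map_some, Option.elim_some]
      rw [if_neg (by omega)]
      push_cast
      ring

-- the dict built by B's pass holds the LAST position whose key equals d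
theorem pv_dict_aux (t : List Char) (hi : Nat) (d : List Char) :
    ∀ (ps : List Nat) (dd : PySem.Dict (List Char) Int),
      (ps.foldl (fun dd p =>
          let dd := if p + 2 ≤ hi then dd.insert ((t.drop p).take 2) (p : Int) else dd
          dd.insert ((t.drop p).take 1) (p : Int)) dd).get? d
        = ((ps.filter (fun p => (decide (p + 2 ≤ hi) && ((t.drop p).take 2 == d))
              || ((t.drop p).take 1 == d))).getLast?.elim (dd.get? d) (fun p => some (p : Int))) := by
  intro ps
  induction ps with
  | nil => intro dd; simp
  | cons p ps ih =>
    intro dd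
    rw [List.foldl_cons, ih, List.filter_cons]
    by_cases hk : ((decide (p + 2 ≤ hi) && ((t.drop p).take 2 == d)) || ((t.drop p).take 1 == d)) = true
    · rw [if_pos hk]
      cases hgl : (ps.filter (fun p => (decide (p + 2 ≤ hi) && ((t.drop p).take 2 == d))
          || ((t.drop p).take 1 == d))).getLast? with
      | some q => simp [List.getLast?_cons, hgl]
      | none =>
        simp only [List.getLast?_cons, hgl, Option.getD_none, Option.elim_none, Option.elim_some]
        rcases Bool.or_eq_true_iff.mp hk with h1 | h2
        · have h12 := Bool.and_eq_true_iff.mp h1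
          have hfit := of_decide_eq_true h12.1
          rw [PySem.Dict.get?_insert]
          split_ifs with hd1
          · rfl
          · rw [PySem.Dict.get?_insert, if_pos (eq_of_beq h12.2).symm]
        · rw [PySem.Dict.get?_insert, if_pos (eq_of_beq h2).symm]
    · rw [if_neg hk]
      simp only [Bool.or_eq_true_iff, not_or, Bool.and_eq_true_iff] at hk
      congr 1
      rw [PySem.Dict.get?_insert, if_neg (fun h => hk.2 (by simp [h]))]
      split_ifs with h2
      · rw [PySem.Dict.get?_insert, if_neg (fun h => (hk.1 ⟨decide_eq_true h2, by simp [h]⟩))]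
      · rfl

theorem pv_beq_prefix (d l : List Char) : (l.take d.length == d) = d.isPrefixOf l := by
  rw [Bool.eq_iff_iff, beq_iff_eq, List.isPrefixOf_iff_prefix, List.prefix_iff_eq_take]
  exact eq_comm

-- for a delimiter of length 1 or 2 the dict key test coincides with pvFit on the window
theorem pv_key_eq_fit (t : List Char) (lo hi : Nat) (hhi : hi ≤ t.length) (d : List Char)
    (hd : d.length = 1 ∨ d.length = 2) :
    (List.range' lo (hi - lo)).filter
        (fun p => (decide (p + 2 ≤ hi) && ((t.drop p).take 2 == d)) || ((t.drop p).take 1 == d))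
      = (List.range' lo (hi - lo)).filter (pvFit t hi d) := by
  apply List.filter_congr
  intro p hp
  rw [List.mem_range'] at hp
  obtain ⟨k, hk, rfl⟩ := hp
  simp only [one_mul]
  have hph : lo + k < hi := by omega
  have hpn : lo + k < t.length := lt_of_lt_of_le hph hhi
  have hd2 : (lo + k) + 2 ≤ hi → ((t.drop (lo + k)).take 2).length = 2 := by
    intro h; rw [List.length_take, List.length_drop]; omega
  have hd1 : ((t.drop (lo + k)).take 1).length = 1 := by
    rw [List.length_take, List.length_drop]; omega
  unfold pvFit
  rcases hd with h1 | h2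
  · -- length-1 delimiter: the 2-char disjunct can never fire
    have hfa : (decide ((lo + k) + 2 ≤ hi) && ((t.drop (lo + k)).take 2 == d)) = false := by
      by_cases hfit : (lo + k) + 2 ≤ hi
      · rcases hbeq : ((t.drop (lo + k)).take 2 == d) with _ | _
        · simp
        · have := eq_of_beq hbeq
          have hlen := congrArg List.length this
          rw [hd2 hfit, h1] at hlen
          omega
      · simp [hfit]
    rw [hfa, Bool.false_or, decide_eq_true (by omega : lo + k + d.length ≤ hi),
      Bool.true_and, ← pv_beq_prefix d (t.drop (lo + k)), h1]
  · -- length-2 delimiter: the 1-char disjunct can never fire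
    have hfa : ((t.drop (lo + k)).take 1 == d) = false := by
      rcases hbeq : ((t.drop (lo + k)).take 1 == d) with _ | _
      · rfl
      · have := eq_of_beq hbeq
        have hlen := congrArg List.length this
        rw [hd1, h2] at hlen
        omega
    rw [hfa, Bool.or_false, ← pv_beq_prefix d (t.drop (lo + k)), h2]

-- B's dict lookup of a 1-/2-char delimiter is exactly the last fitting match position
theorem pv_dict_get (t : List Char) (lo hi : Nat) (hhi : hi ≤ t.length) (d : List Char)
    (hd : d.length = 1 ∨ d.length = 2) :
    (pvDictB t lo hi).get? d
      = (((List.range' lo (hi - lo)).filter (pvFit t hi d)).getLast?.elim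
          none (fun p => some (p : Int))) := by
  unfold pvDictB
  rw [pv_dict_aux, pv_key_eq_fit t lo hi hhi d hd, PySem.Dict.get?_empty]

-- the two loops agree delimiter by delimiter when start ≥ -1
theorem pv_go_agree (text : String) (start end_ : Int) (h : -1 ≤ start) :
    ∀ (bps : List (String × Int)),
      (∀ x ∈ bps, x.1.toList ≠ [] ∧ x.2 ≤ (x.1.toList.length : Int)
        ∧ (x.1.toList.length = 1 ∨ x.1.toList.length = 2)) →
      pvGoA text start end_ (max start (end_ - 100)) bps
        = pvGoB start end_
            (pvDictB text.toList
              (pvClamp0 (max start (end_ - 100)) text.toList.length)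
              (min (pvClamp0 end_ text.toList.length) text.toList.length))
            (bps.map (fun x => x.1.toList)) := by
  intro bps
  induction bps with
  | nil => intro _; rfl
  | cons hd1 rest ih =>
    intro hall
    obtain ⟨dS, m⟩ := hd1
    obtain ⟨hne, hm, hlen⟩ := hall _ (List.mem_cons_self)
    have hm' : m ≤ (dS.toList.length : Int) := hm
    have hrest := fun x hx => hall x (List.mem_cons_of_mem _ hx)
    simp only [List.map_cons]
    rw [show pvGoA text start end_ (max start (end_ - 100)) ((dS, m) :: rest)
        = (let break_pos := PySem.Str.rfindFrom text dS (max start (end_ - 100)) (some end_)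
          if break_pos > start ∧ break_pos + PySem.Str.len dS - start ≥ m then
            break_pos + PySem.Str.len dS
          else pvGoA text start end_ (max start (end_ - 100)) rest) from rfl]
    rw [show pvGoB start end_
          (pvDictB text.toList
            (pvClamp0 (max start (end_ - 100)) text.toList.length)
            (min (pvClamp0 end_ text.toList.length) text.toList.length))
          (dS.toList :: rest.map (fun x => x.1.toList))
        = (match (pvDictB text.toList
            (pvClamp0 (max start (end_ - 100)) text.toList.length)
            (min (pvClamp0 end_ text.toList.length) text.toList.length)).get? dS.toList with
          | some pos => if pos > start then pos + dS.toList.length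
              else pvGoB start end_ (pvDictB text.toList
                (pvClamp0 (max start (end_ - 100)) text.toList.length)
                (min (pvClamp0 end_ text.toList.length) text.toList.length))
                (rest.map (fun x => x.1.toList))
          | none => pvGoB start end_ (pvDictB text.toList
                (pvClamp0 (max start (end_ - 100)) text.toList.length)
                (min (pvClamp0 end_ text.toList.length) text.toList.length))
                (rest.map (fun x => x.1.toList))) from rfl]
    rw [PySem.Str.rfindFrom_eq,
      pv_rfindFrom_eq text.toList dS.toList _ end_ hne,
      pv_dict_get text.toList _ _ (min_le_right _ _) dS.toList hlen]
    cases hgl : ((List.range' (pvClamp0 (max start (end_ - 100)) text.toList.length)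
        (min (pvClamp0 end_ text.toList.length) text.toList.length
          - pvClamp0 (max start (end_ - 100)) text.toList.length)).filter
        (pvFit text.toList (min (pvClamp0 end_ text.toList.length) text.toList.length)
          dS.toList)).getLast? with
    | none =>
      simp only [Option.elim_none]
      rw [if_neg (by intro hc; have := hc.1; omega)]
      exact ih hrest
    | some q =>
      simp only [Option.elim_some]
      have hlenS : PySem.Str.len dS = (dS.toList.length : Int) := rfl
      by_cases hq : (q : Int) > start
      · rw [if_pos ⟨hq, by rw [hlenS]; omega⟩, if_pos hq, hlenS]
      · rw [if_neg (fun hc => hq hc.1), if_neg hq]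
        exact ih hrest

-- ===== VERDICT (by name: the statement is the Claim_ definition above) =====
theorem find_optimal_breakpoint_py_spec : Claim_unchanged_find_optimal_breakpoint_py := by
  intro text start end_ _ hnD
  unfold find_optimal_breakpoint_py find_optimal_breakpoint_py_alt
  by_cases hst : -1 ≤ start
  · rw [pv_go_agree text start end_ hst pvBpsA (by decide)]
    rfl
  · -- start ≤ -2: ¬D gives a "\n\n" occurrence in the window; both return it at once
    rw [not_le] at hst
    unfold D_find_optimal_breakpoint_py at hnD
    have hin : PySem.Chars.isIn ['\n', '\n']
        (PySem.List.slice text.toList (some (max start (end_ - 100))) (some end_)) = true := by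
      rcases hb : PySem.Chars.isIn ['\n', '\n']
          (PySem.List.slice text.toList (some (max start (end_ - 100))) (some end_)) with _ | _
      · exact absurd ⟨by omega, hb⟩ hnD
      · rfl
    rw [pv_slice_window] at hin
    obtain ⟨jj, hjj⟩ := (PySem.Chars.exists_prefix_drop_iff_isIn _ _).mpr hin
    rw [List.drop_drop, List.drop_take, List.prefix_take_iff] at hjj
    obtain ⟨hpre, hlen2⟩ := hjj
    rw [show (['\n', '\n'] : List Char).length = 2 from rfl] at hlen2
    have hex : ∃ p,
        p ∈ List.range' (pvClamp0 (max start (end_ - 100)) text.toList.length)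
          (min (pvClamp0 end_ text.toList.length) text.toList.length
            - pvClamp0 (max start (end_ - 100)) text.toList.length) ∧
        p + 2 ≤ min (pvClamp0 end_ text.toList.length) text.toList.length ∧
        (text.toList.drop p).take 2 = ['\n', '\n'] := by
      refine ⟨pvClamp0 (max start (end_ - 100)) text.toList.length + jj, ?_, by omega,
        (List.prefix_iff_eq_take.mp hpre).symm⟩
      rw [List.mem_range']
      exact ⟨jj, by omega, by omega⟩
    obtain ⟨p, hpmem, hfit2, htake⟩ := hex
    -- the fitting-match filter for "\n\n" is nonempty, so its getLast? is some q
    have hmemf : p ∈ (List.range' (pvClamp0 (max start (end_ - 100)) text.toList.length)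
        (min (pvClamp0 end_ text.toList.length) text.toList.length
          - pvClamp0 (max start (end_ - 100)) text.toList.length)).filter
        (pvFit text.toList (min (pvClamp0 end_ text.toList.length) text.toList.length)
          ['\n', '\n']) := by
      rw [List.mem_filter]
      refine ⟨hpmem, ?_⟩
      unfold pvFit
      rw [Bool.and_eq_true_iff]
      constructor
      · exact decide_eq_true hfit2
      · rw [List.isPrefixOf_iff_prefix, List.prefix_iff_eq_take]
        exact htake.symm
    obtain ⟨q, hq⟩ := Option.isSome_iff_exists.mp
      (List.getLast?_isSome.mpr (List.ne_nil_of_mem hmemf))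
    show pvGoA text start end_ (max start (end_ - 100)) pvBpsA = _
    rw [show pvGoA text start end_ (max start (end_ - 100)) pvBpsA
        = (let break_pos := PySem.Str.rfindFrom text "\n\n" (max start (end_ - 100)) (some end_)
          if break_pos > start ∧ break_pos + PySem.Str.len "\n\n" - start ≥ 2 then
            break_pos + PySem.Str.len "\n\n"
          else pvGoA text start end_ (max start (end_ - 100)) (pvBpsA.drop 1)) from rfl]
    rw [PySem.Str.rfindFrom_eq,
      pv_rfindFrom_eq text.toList ("\n\n").toList _ end_ (by decide)]
    rw [show ("\n\n").toList = ['\n', '\n'] from rfl, hq]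
    simp only [Option.elim_some]
    rw [if_pos ⟨by omega, by
      rw [show PySem.Str.len "\n\n" = 2 from rfl]; omega⟩]
    rw [show pvGoB start end_
          (pvDictB text.toList
            (pvClamp0 (max start (end_ - 100)) text.toList.length)
            (min (pvClamp0 end_ text.toList.length) text.toList.length)) pvBpsB
        = (match (pvDictB text.toList
            (pvClamp0 (max start (end_ - 100)) text.toList.length)
            (min (pvClamp0 end_ text.toList.length) text.toList.length)).get? ['\n', '\n'] with
          | some pos => if pos > start then pos + (['\n', '\n'] : List Char).length
              else pvGoB start end_ (pvDictB text.toList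
                (pvClamp0 (max start (end_ - 100)) text.toList.length)
                (min (pvClamp0 end_ text.toList.length) text.toList.length)) (pvBpsB.drop 1)
          | none => pvGoB start end_ (pvDictB text.toList
                (pvClamp0 (max start (end_ - 100)) text.toList.length)
                (min (pvClamp0 end_ text.toList.length) text.toList.length)) (pvBpsB.drop 1)) from rfl]
    rw [pv_dict_get text.toList _ _ (min_le_right _ _) ['\n', '\n'] (Or.inr rfl), hq]
    simp only [Option.elim_some]
    rw [if_pos (by omega : (q : Int) > start)]
    rw [show PySem.Str.len "\n\n" = 2 from rfl]
    rfl

theorem find_optimal_breakpoint_py_changed : Claim_changed_find_optimal_breakpoint_py := by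
  unfold Claim_changed_find_optimal_breakpoint_py; decide
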